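-- pv_equiv track=rewrite | github.com/pty9714/SSAFY_10_class11_algorithm | 20241101/Sun.py | f
-- ===== SOURCE A (Python) =====
-- def f(bit, length):
--     if length == 0:
--         return True
--     elif length == 1:
--         return False
--
--     A = [((1 << i) & bit) != 0 for i in range(length)]
--     P = [0] * (length + 1)
--     P[0] = 1
--
--     for i in range(1, length):
--         if A[i] == A[i - 1]:
--             P[i] = P[i - 1] + 1
--         else:
--             P[i] = 1
--
--     ret = False
--     i = length - 1
--
--     while i > 0:
--         if P[i] > 1:
--             s = i - P[i] + 1
--             e = i
--             i -= P[i]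
--             tmp = 0
--
--             for j in range(s):
--                 if A[j]:
--                     tmp += 1 << j
--
--             for j in range(e + 1, length):
--                 if A[j]:
--                     tmp += 1 << (j - e + s - 1)
--
--             if f(tmp, length - e + s - 1):
--                 ret = True
--
--             if ret:
--                 break
--         else:
--             i -= 1
--
--     return ret
-- ===== SOURCE B (Python) =====
-- def f(bit, length):
--     # Run-length encode the bitstring (LSB first); only run lengths matter,
--     # since runs alternate between 0s and 1s.
--     runs = []
--     prev = None
--     for i in range(length):
--         b = (bit >> i) & 1
--         if b == prev:
--             runs[-1] += 1
--         else:
--             runs.append(1)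
--             prev = b
--     def solve(rs):
--         if not rs:
--             return True
--         for j in range(len(rs)):
--             if rs[j] >= 2:
--                 if j == 0:
--                     nxt = rs[1:]
--                 elif j == len(rs) - 1:
--                     nxt = rs[:j]
--                 else:
--                     nxt = rs[:j-1] + [rs[j-1] + rs[j+1]] + rs[j+2:]
--                 if solve(nxt):
--                     return True
--         return False
--     return solve(runs)
-- ===== Notes on version B (the rewrite author's own statement) =====
-- stated objective: faster
-- what changed: B run-length-encodes the bitstring once and searches over lists of run lengths (deleting a run merges its neighbours), instead of A's per-call bit arrays, prefix-run table and integer re-encoding of the remaining bits at every recursive step.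
import Mathlib
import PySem

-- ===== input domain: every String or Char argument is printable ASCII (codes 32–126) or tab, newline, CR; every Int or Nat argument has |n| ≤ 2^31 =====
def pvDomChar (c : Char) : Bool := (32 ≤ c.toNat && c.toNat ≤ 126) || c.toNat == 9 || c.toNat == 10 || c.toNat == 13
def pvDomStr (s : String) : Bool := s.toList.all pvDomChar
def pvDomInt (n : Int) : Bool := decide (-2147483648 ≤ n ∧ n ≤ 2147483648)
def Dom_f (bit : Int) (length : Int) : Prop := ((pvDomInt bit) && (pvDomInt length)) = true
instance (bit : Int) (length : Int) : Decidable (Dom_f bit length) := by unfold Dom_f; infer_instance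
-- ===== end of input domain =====

-- B re-implements the search over run-length-encoded bitstrings (deleting a run merges its
-- neighbours) instead of A's per-call bit arrays, prefix-run table and integer re-encoding.

-- ===== PORT A =====

-- exact port of Python's `((1 << i) & bit) != 0` for 0 ≤ i (bit i of an arbitrary int,
-- two's complement): floor-divide by 2^i, take parity.  A only calls it with 0 ≤ i (from range).
def pyBitTest (bit : Int) (i : Int) : Bool :=
  PySem.Int.mod (PySem.Int.floordiv bit ((2 : Int) ^ i.toNat)) 2 == 1

-- `P = [0]*(length+1); P[0] = 1; for i in range(1, length): P[i] = P[i-1]+1 if A[i]==A[i-1] else 1`.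
-- All indices are nonnegative and in range, so `.set`/`.getD` are exact for Python's `P[i] = …`/`P[i]`.
def buildP (A : List Bool) (length : Int) : List Int :=
  (PySem.List.pyRange 1 length 1).foldl
    (fun P i =>
      P.set i.toNat (if A.getD i.toNat false == A.getD (i - 1).toNat false
                     then P.getD (i - 1).toNat 0 + 1 else 1))
    ((List.replicate (length + 1).toNat 0).set 0 1)

-- the `while i > 0` loop of A; `ret` is A's `ret` variable.  The indices j of both `for j` loops
-- and the shift amounts are nonnegative on every reachable state, so `.getD`/`.toNat` are exact.
def loopA (frec : Int → Int → Bool) (A : List Bool) (P : List Int) (length : Int)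
    (ret : Bool) (i : Int) : Bool :=
  if _h : 0 < i then
    if _h2 : 1 < P.getD i.toNat 0 then
      let s := i - P.getD i.toNat 0 + 1
      let e := i
      let tmp1 := (PySem.List.pyRange 0 s 1).foldl
        (fun t j => if A.getD j.toNat false then t + (2 : Int) ^ j.toNat else t) 0
      let tmp := (PySem.List.pyRange (e + 1) length 1).foldl
        (fun t j => if A.getD j.toNat false then t + (2 : Int) ^ (j - e + s - 1).toNat else t) tmp1
      let ret' := if frec tmp (length - e + s - 1) then true else ret
      if ret' then ret' else loopA frec A P length ret' (i - P.getD i.toNat 0)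
    else loopA frec A P length ret (i - 1)
  else ret
termination_by i.toNat
decreasing_by all_goals omega

-- A's recursion, with fuel: every recursive call shrinks `length` by ≥ 2, so fuel
-- `length.toNat + 1` at the top level always suffices (the fuel-0 branch is unreachable).
def fGo : Nat → Int → Int → Bool
  | 0, _, _ => false
  | fuel + 1, bit, length =>
    if length == 0 then true
    else if length == 1 then false
    else
      let A := (PySem.List.pyRange 0 length 1).map (fun i => pyBitTest bit i)
      loopA (fGo fuel) A (buildP A length) length false (length - 1)

def f (bit : Int) (length : Int) : Bool := fGo (length.toNat + 1) bit length

-- ===== PORT B =====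

-- one step of B's run-length-encoding loop: state = (runs, prev).  `runs[-1] += 1` only fires
-- with runs nonempty (prev is set on first iteration), so `getLastD`/`dropLast` are exact.
def buildRunsStep (st : List Int × Option Int) (b : Int) : List Int × Option Int :=
  if some b == st.2 then (st.1.dropLast ++ [st.1.getLastD 0 + 1], st.2)
  else (st.1 ++ [1], some b)

-- `rs` with run j deleted and its neighbours merged; all slice bounds are nonnegative
-- (`rs[1:]`, `rs[:j]`, `rs[:j-1] + [rs[j-1]+rs[j+1]] + rs[j+2:]`), so take/drop are exact.
def removeRun (rs : List Int) (j : Nat) : List Int :=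
  if j == 0 then rs.drop 1
  else if j == rs.length - 1 then rs.take j
  else rs.take (j - 1) ++ [rs.getD (j - 1) 0 + rs.getD (j + 1) 0] ++ rs.drop (j + 2)

-- B's `solve`, with fuel: every recursive call shrinks the list, so fuel
-- `length.toNat + 1 ≥ len(runs) + 1` at the top level always suffices.
def solveGo : Nat → List Int → Bool
  | 0, _ => false
  | fuel + 1, rs =>
    if rs.isEmpty then true
    else (List.range rs.length).any
      (fun j => if 2 ≤ rs.getD j 0 then solveGo fuel (removeRun rs j) else false)

def f_alt (bit : Int) (length : Int) : Bool :=
  let st := (PySem.List.pyRange 0 length 1).foldl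
    (fun st i =>
      buildRunsStep st (PySem.Int.mod (PySem.Int.floordiv bit ((2 : Int) ^ i.toNat)) 2))
    ([], none)
  solveGo (length.toNat + 1) st.1

-- ===== PRECONDITION & SPEC =====

-- A raises IndexError for negative length (`P[0] = 1` on the empty list `[0]*(length+1)`).
def Pre_f (bit : Int) (length : Int) : Prop := 0 ≤ length
instance (bit : Int) (length : Int) : Decidable (Pre_f bit length) := by
  unfold Pre_f; infer_instance

def pvWitness_f : Int × Int := (6, 4)

def Spec_f (bit : Int) (length : Int) (out : Bool) : Prop := out = f_alt bit length
instance (bit : Int) (length : Int) (out : Bool) : Decidable (Spec_f bit length out) := by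
  unfold Spec_f; infer_instance

-- ===== CLAIM (what is proved, stated in full; the proofs are below) =====
def Claim_equal_f : Prop :=
  ∀ (bit : Int) (length : Int), Dom_f bit length → Pre_f bit length →
    Spec_f bit length (f bit length)

-- ===== LEMMAS AND PROOFS =====

-- the bitstring of `bit` of length n, LSB first (the list A builds)
def bitsL (bit : Int) (n : Nat) : List Bool :=
  (List.range n).map (fun (i : Nat) => pyBitTest bit (i : Int))

-- run-length groups of a bit list (adjacent equal bits grouped), built by foldr
def push (b : Bool) : List (Bool × Nat) → List (Bool × Nat)
  | p :: t => if b == p.1 then (p.1, p.2 + 1) :: t else (b, 1) :: p :: t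
  | [] => [(b, 1)]

def groups (L : List Bool) : List (Bool × Nat) := L.foldr push []

-- `groups` extended on the right by one bit
def pushR : List (Bool × Nat) → Bool → List (Bool × Nat)
  | [], b => [(b, 1)]
  | [(c, k)], b => if b == c then [(c, k + 1)] else [(c, k), (b, 1)]
  | x :: y :: t, b => x :: pushR (y :: t) b

def unpack (G : List (Bool × Nat)) : List Bool := G.flatMap (fun p => List.replicate p.2 p.1)

def WF (G : List (Bool × Nat)) : Prop :=
  (∀ p ∈ G, 1 ≤ p.2) ∧ List.IsChain (fun p q => p.1 ≠ q.1) G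

-- little-endian value of a bit list
def encodeN : List Bool → Nat
  | [] => 0
  | b :: l => (if b then 1 else 0) + 2 * encodeN l

-- run lengths as Ints
def runsI (G : List (Bool × Nat)) : List Int := G.map (fun p => (p.2 : Int))

-- canonical B-side solver (enough fuel)
def Solve (rs : List Int) : Bool := solveGo (rs.length + 1) rs

-- the P[i] recurrence of A, as a function
def Q (L : List Bool) : Nat → Int
  | 0 => 1
  | i + 1 => if L.getD (i + 1) false == L.getD i false then Q L (i) + 1 else 1

-- the bit list left after deleting run t
def delL (G : List (Bool × Nat)) (t : Nat) : List Bool :=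
  unpack (G.take t) ++ unpack (G.drop (t + 1))

-- ---- groups / unpack basics ----

lemma unpack_nil : unpack [] = [] := rfl

lemma unpack_cons (c : Bool) (k : Nat) (G : List (Bool × Nat)) :
    unpack ((c, k) :: G) = List.replicate k c ++ unpack G := by
  simp [unpack]

lemma unpack_append (X Y : List (Bool × Nat)) : unpack (X ++ Y) = unpack X ++ unpack Y := by
  simp [unpack]

lemma unpack_cons' (p : Bool × Nat) (G : List (Bool × Nat)) :
    unpack (p :: G) = List.replicate p.2 p.1 ++ unpack G := by
  obtain ⟨c, k⟩ := p
  exact unpack_cons c k G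

lemma unpack_split (G : List (Bool × Nat)) (t : Nat) (ht : t < G.length) :
    unpack G = unpack (G.take t) ++ List.replicate (G[t]'ht).2 (G[t]'ht).1
      ++ unpack (G.drop (t + 1)) := by
  conv_lhs => rw [show G = G.take t ++ G.drop t by simp]
  rw [List.drop_eq_getElem_cons ht, unpack_append, unpack_cons']
  simp

lemma unpack_push (b : Bool) (G : List (Bool × Nat)) :
    unpack (push b G) = b :: unpack G := by
  match G with
  | [] => rfl
  | (c, k) :: t =>
    by_cases hb : b = c
    · subst hb
      rw [show push b ((b, k) :: t) = (b, k + 1) :: t by simp [push]]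
      rw [unpack_cons, unpack_cons, List.replicate_succ]
      simp
    · rw [show push b ((c, k) :: t) = (b, 1) :: (c, k) :: t by simp [push, hb]]
      rw [unpack_cons]
      simp [List.replicate_succ]

lemma unpack_groups (L : List Bool) : unpack (groups L) = L := by
  induction L with
  | nil => rfl
  | cons b l ih =>
    show unpack (push b (groups l)) = b :: l
    rw [unpack_push, ih]
  

lemma WF_push (b : Bool) (G : List (Bool × Nat)) (h : WF G) : WF (push b G) := by
  obtain ⟨h1, h2⟩ := h
  match G with
  | [] => exact ⟨by simp [push], by simp [push]⟩
  | (c, k) :: t =>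
    by_cases hb : b = c
    · rw [show push b ((c, k) :: t) = (c, k + 1) :: t by simp [push, hb]]
      refine ⟨?_, ?_⟩
      · intro p hp
        rcases List.mem_cons.mp hp with hp | hp
        · simp [hp]
        · exact h1 p (by simp [hp])
      · rw [List.isChain_cons] at h2 ⊢
        exact h2
    · rw [show push b ((c, k) :: t) = (b, 1) :: (c, k) :: t by simp [push, hb]]
      refine ⟨?_, ?_⟩
      · intro p hp
        rcases List.mem_cons.mp hp with hp | hp
        · simp [hp]
        · exact h1 p hp
      · exact List.isChain_cons_cons.mpr ⟨by simpa using hb, h2⟩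

lemma WF_groups (L : List Bool) : WF (groups L) := by
  induction L with
  | nil => exact ⟨by simp [groups], by simp [groups]⟩
  | cons b l ih => exact WF_push b (groups l) ih

lemma WF_append_left {X Y : List (Bool × Nat)} (h : WF (X ++ Y)) : WF X := by
  obtain ⟨h1, h2⟩ := h
  exact ⟨fun p hp => h1 p (by simp [hp]), (List.isChain_append.mp h2).1⟩
  

lemma WF_append_right {X Y : List (Bool × Nat)} (h : WF (X ++ Y)) : WF Y := by
  obtain ⟨h1, h2⟩ := h
  exact ⟨fun p hp => h1 p (by simp [hp]), (List.isChain_append.mp h2).2.1⟩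
  

lemma unpack_ne_nil {G : List (Bool × Nat)} (h : WF G) (hne : G ≠ []) : unpack G ≠ [] := by
  match G with
  | (c, k) :: t =>
    have hk : 1 ≤ k := h.1 (c, k) (by simp)
    simp [unpack_cons]
    intro hrep
    omega
  

lemma unpack_eq_nil {G : List (Bool × Nat)} (h : WF G) (he : unpack G = []) : G = [] := by
  by_contra hne
  exact unpack_ne_nil h hne he
  

lemma length_le_unpack {G : List (Bool × Nat)} (h : WF G) : G.length ≤ (unpack G).length := by
  induction G with
  | nil => simp [unpack]
  | cons p t ih =>
    obtain ⟨c, k⟩ := p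
    have hk : 1 ≤ k := h.1 (c, k) (by simp)
    have := ih (WF_append_right (X := [(c, k)]) (by simpa using h))
    simp only [unpack_cons, List.length_append, List.length_replicate, List.length_cons]
    omega
  

lemma head?_groups (L : List Bool) : (groups L).head?.map Prod.fst = L.head? := by
  induction L with
  | nil => rfl
  | cons b l ih =>
    show (push b (groups l)).head?.map Prod.fst = some b
    match h : groups l with
    | [] => rfl
    | (c, k) :: t =>
      by_cases hb : b = c
      · simp [push, hb]
      · simp [push, hb]
  

lemma groups_replicate_append (c : Bool) (k : Nat) (M : List Bool) (hk : 1 ≤ k)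
    (hM : ∀ b, M.head? = some b → b ≠ c) :
    groups (List.replicate k c ++ M) = (c, k) :: groups M := by
  induction k with
  | zero => omega
  | succ k ih =>
    by_cases hk0 : k = 0
    · subst hk0
      show push c (groups M) = (c, 1) :: groups M
      match h : groups M with
      | [] => rfl
      | (d, j) :: t =>
        have hd : some d = M.head? := by
          have := head?_groups M; rw [h] at this; simpa using this
        have hdc : d ≠ c := hM d hd.symm
        simp [push, Ne.symm hdc]
    · have hk1 : 1 ≤ k := by omega
      show push c (groups (List.replicate k c ++ M)) = (c, k + 1) :: groups M
      rw [show groups (List.replicate k c ++ M) = (c, k) :: groups M from ih hk1]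
      simp [push]
  

lemma groups_unpack {G : List (Bool × Nat)} (h : WF G) : groups (unpack G) = G := by
  induction G with
  | nil => rfl
  | cons p t ih =>
    obtain ⟨c, k⟩ := p
    have hk : 1 ≤ k := h.1 (c, k) (by simp)
    have ht : WF t := WF_append_right (X := [(c, k)]) (by simpa using h)
    rw [unpack_cons, groups_replicate_append c k (unpack t) hk ?_, ih ht]
    intro b hb
    cases t with
    | nil => simp [unpack] at hb
    | cons q t' =>
      obtain ⟨d, j⟩ := q
      have hj : 1 ≤ j := ht.1 (d, j) (by simp)
      rw [unpack_cons] at hb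
      have hbd : d = b := by
        obtain ⟨j', rfl⟩ : ∃ j', j = j' + 1 := ⟨j - 1, by omega⟩
        rw [List.replicate_succ] at hb
        simpa using hb
      have hcd : c ≠ d := (List.isChain_cons_cons.mp h.2).1
      rw [← hbd]
      exact Ne.symm hcd

lemma getLast?_unpack {G : List (Bool × Nat)} (h : WF G) :
    (unpack G).getLast? = G.getLast?.map Prod.fst := by
  induction G with
  | nil => rfl
  | cons p t ih =>
    obtain ⟨c, k⟩ := p
    have hk : 1 ≤ k := h.1 (c, k) (by simp)
    have ht : WF t := WF_append_right (X := [(c, k)]) (by simpa using h)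
    cases t with
    | nil =>
      rw [unpack_cons]
      simp only [unpack, List.flatMap_nil, List.append_nil]
      obtain ⟨k', rfl⟩ : ∃ k', k = k' + 1 := ⟨k - 1, by omega⟩
      simp [List.getLast?_replicate]
    | cons q t' =>
      have hne : unpack (q :: t') ≠ [] := unpack_ne_nil ht (by simp)
      rw [unpack_cons, List.getLast?_append_of_ne_nil _ hne, ih ht]
      simp

-- ---- encodeN ----

lemma getD_set_self (l : List Int) (i : Nat) (v : Int) (h : i < l.length) :
    (l.set i v).getD i 0 = v := by
  rw [List.getD_eq_getElem _ _ (by simpa using h)]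
  exact List.getElem_set_self _

lemma getD_set_ne (l : List Int) (i j : Nat) (v : Int) (hne : i ≠ j) :
    (l.set i v).getD j 0 = l.getD j 0 := by
  by_cases hj : j < l.length
  · rw [List.getD_eq_getElem _ _ (by simpa using hj), List.getD_eq_getElem _ _ hj]
    exact List.getElem_set_ne hne _
  · rw [List.getD_eq_default _ _ (by simpa using hj), List.getD_eq_default _ _ (by omega)]

lemma encodeN_append (M N : List Bool) :
    encodeN (M ++ N) = encodeN M + 2 ^ M.length * encodeN N := by
  induction M with
  | nil => simp [encodeN]
  | cons b l ih =>
    simp only [List.cons_append, encodeN, ih, List.length_cons, pow_succ]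
    ring
  

lemma pyBitTest_natCast (m i : Nat) :
    pyBitTest (m : Int) (i : Nat) = (m / 2 ^ i % 2 == 1) := by
  unfold pyBitTest
  rw [show (((i : Nat) : Int)).toNat = i by simp]
  rw [show ((2 : Int) ^ i) = ((2 ^ i : Nat) : Int) by push_cast; ring]
  rw [PySem.Int.floordiv_natCast]
  rw [show (2 : Int) = ((2 : Nat) : Int) by rfl, PySem.Int.mod_natCast]
  generalize m / 2 ^ i % 2 = x
  by_cases hx : x = 1
  · simp [hx]
  · have hx' : ((x : Nat) : Int) ≠ 1 := by exact_mod_cast hx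
    simp [hx, hx']
  

lemma pyBitTest_encodeN (M : List Bool) (j : Nat) (hj : j < M.length) :
    pyBitTest (encodeN M : Int) (j : Nat) = M.getD j false := by
  induction M generalizing j with
  | nil => simp at hj
  | cons b l ih =>
    rw [pyBitTest_natCast]
    cases j with
    | zero =>
      show ((encodeN (b :: l)) / 2 ^ 0 % 2 == 1) = b
      simp only [encodeN, pow_zero, Nat.div_one]
      cases b
      · simp only [if_neg Bool.false_ne_true, List.getD_cons_zero]
        have : (0 + 2 * encodeN l) % 2 = 0 := by omega
        simp [this]
      · simp only [if_pos rfl, List.getD_cons_zero]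
        have : (1 + 2 * encodeN l) % 2 = 1 := by omega
        simp [this]
    | succ j =>
      have hstep : encodeN (b :: l) / 2 ^ (j + 1) = encodeN l / 2 ^ j := by
        have h2 : encodeN (b :: l) / 2 = encodeN l := by
          show ((if b then 1 else 0) + 2 * encodeN l) / 2 = encodeN l
          cases b <;> simp <;> omega
        rw [pow_succ', ← Nat.div_div_eq_div_mul, h2]
      show (encodeN (b :: l) / 2 ^ (j + 1) % 2 == 1) = (b :: l).getD (j + 1) false
      rw [hstep, List.getD_cons_succ, ← pyBitTest_natCast]
      exact ih j (by simpa using hj)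
  

lemma bitsL_encodeN (M : List Bool) : bitsL (encodeN M : Int) M.length = M := by
  apply List.ext_getElem
  · simp [bitsL]
  · intro i h1 h2
    simp only [bitsL, List.getElem_map, List.getElem_range]
    rw [pyBitTest_encodeN M i h2, List.getD_eq_getElem _ _ h2]
  

-- ---- the A list ----

lemma Alist_eq (bit : Int) (n : Nat) :
    (PySem.List.pyRange 0 (n : Int) 1).map (fun i => pyBitTest bit i) = bitsL bit n := by
  rw [PySem.List.pyRange_zero_natCast, List.map_map]
  rfl
  

-- ---- buildP ----

def stepP (L : List Bool) (P : List Int) (i : Int) : List Int :=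
  P.set i.toNat (if L.getD i.toNat false == L.getD (i - 1).toNat false
                 then P.getD (i - 1).toNat 0 + 1 else 1)

def initP (n : Nat) : List Int := (List.replicate (n + 1) 0).set 0 1

def PmDef (L : List Bool) (m : Nat) : List Int :=
  (PySem.List.pyRange 1 (m : Int) 1).foldl (stepP L) (initP L.length)

lemma buildP_eq_PmDef (L : List Bool) : buildP L (L.length : Int) = PmDef L L.length := by
  unfold buildP PmDef stepP initP
  rw [show (((L.length : Int)) + 1).toNat = L.length + 1 by omega]

lemma PmDef_zero (L : List Bool) : PmDef L 0 = initP L.length := by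
  unfold PmDef
  rw [PySem.List.pyRange_one_eq_nil (by omega)]
  rfl

lemma PmDef_one (L : List Bool) : PmDef L 1 = initP L.length := by
  unfold PmDef
  rw [show ((1 : Nat) : Int) = 1 by rfl, PySem.List.pyRange_one_eq_nil (by omega)]
  rfl

lemma PmDef_succ (L : List Bool) (m : Nat) (hm : 1 ≤ m) :
    PmDef L (m + 1) = stepP L (PmDef L m) (m : Int) := by
  unfold PmDef
  rw [show ((m + 1 : Nat) : Int) = (m : Int) + 1 by push_cast; ring]
  rw [PySem.List.pyRange_one_succ_right (by omega), List.foldl_append]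
  rfl

lemma initP_getD_zero (n : Nat) : (initP n).getD 0 0 = 1 := by
  apply getD_set_self
  simp

lemma initP_length (n : Nat) : (initP n).length = n + 1 := by
  simp [initP]

lemma PmDef_spec (L : List Bool) : ∀ m : Nat, m ≤ L.length →
    (PmDef L m).length = L.length + 1 ∧
    (∀ i : Nat, (i = 0 ∨ i < m) → (PmDef L m).getD i 0 = Q L i) := by
  intro m
  induction m with
  | zero =>
    intro _
    rw [PmDef_zero]
    refine ⟨initP_length _, ?_⟩
    intro i hi
    have : i = 0 := by omega
    subst this
    exact initP_getD_zero _
  | succ m ih =>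
    intro hm1
    by_cases hm0 : m = 0
    · subst hm0
      rw [PmDef_one]
      refine ⟨initP_length _, ?_⟩
      intro i hi
      have : i = 0 := by omega
      subst this
      exact initP_getD_zero _
    · obtain ⟨ihl, ihv⟩ := ih (by omega)
      rw [PmDef_succ L m (by omega)]
      unfold stepP
      rw [show ((m : Int)).toNat = m by omega, show ((m : Int) - 1).toNat = m - 1 by omega]
      have hQ : (if L.getD m false == L.getD (m - 1) false
            then (PmDef L m).getD (m - 1) 0 + 1 else 1) = Q L m := by
        obtain ⟨m', rfl⟩ : ∃ m', m = m' + 1 := ⟨m - 1, by omega⟩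
        have hgm : (PmDef L (m' + 1)).getD m' 0 = Q L m' := by
          apply ihv
          by_cases h0 : m' = 0
          · left; exact h0
          · right; omega
        rw [show m' + 1 - 1 = m' by omega, hgm]
        rfl
      constructor
      · rw [List.length_set]
        exact ihl
      · intro i hi
        by_cases him : i = m
        · subst him
          rw [getD_set_self _ _ _ (by omega), hQ]
        · rw [getD_set_ne _ _ _ _ (by omega)]
          apply ihv
          rcases hi with rfl | hi
          · left; rfl
          · right; omega

lemma buildP_getD (L : List Bool) (i : Nat) (hi : i < L.length) :
    (buildP L (L.length : Int)).getD i 0 = Q L i := by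
  rw [buildP_eq_PmDef]
  exact (PmDef_spec L L.length le_rfl).2 i (by omega)

-- ---- positional facts about unpack ----

lemma getD_unpack_run (X Y : List (Bool × Nat)) (c : Bool) (r : Nat) (d : Nat) (hd : d < r) :
    (unpack (X ++ (c, r) :: Y)).getD ((unpack X).length + d) false = c := by
  rw [unpack_append, unpack_cons]
  rw [List.getD_append_right _ _ _ _ (by omega)]
  rw [show (unpack X).length + d - (unpack X).length = d by omega]
  rw [List.getD_eq_getElem _ _ (by simp; omega)]
  rw [List.getElem_append_left (by simp; omega)]
  simp
  

lemma getD_unpack_last (X : List (Bool × Nat)) (hWF : WF X) (hne : X ≠ []) :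
    (unpack X).getD ((unpack X).length - 1) false = (X.getLast hne).1 := by
  have h1 := getLast?_unpack hWF
  rw [List.getLast?_eq_some_getLast (h := hne)] at h1
  have hne' : unpack X ≠ [] := unpack_ne_nil hWF hne
  rw [List.getLast?_eq_getElem?] at h1
  simp only [Option.map_some] at h1
  rw [List.getD_eq_getElem _ _ (by
    have := List.length_pos_iff.mpr hne'
    omega)]
  have := List.getElem?_eq_getElem (l := unpack X) (i := (unpack X).length - 1)
    (by have := List.length_pos_iff.mpr hne'; omega)
  rw [this] at h1
  exact Option.some.inj h1
  

lemma Q_run (X Y : List (Bool × Nat)) (c : Bool) (r : Nat)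
    (hWF : WF (X ++ (c, r) :: Y)) (d : Nat) (hd : d < r) :
    Q (unpack (X ++ (c, r) :: Y)) ((unpack X).length + d) = (d : Int) + 1 := by
  induction d with
  | zero =>
    by_cases hS : (unpack X).length = 0
    · rw [hS]
      rfl
    · have hne : X ≠ [] := by
        intro h; rw [h] at hS; exact hS rfl
      obtain ⟨S', hS'⟩ : ∃ S', (unpack X).length = S' + 1 := ⟨(unpack X).length - 1, by omega⟩
      rw [hS']
      show Q _ (S' + 1) = 1
      have hval : (unpack (X ++ (c, r) :: Y)).getD (S' + 1) false = c := by
        have := getD_unpack_run X Y c r 0 (by omega)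
        rw [hS'] at this
        simpa using this
      have hprev : (unpack (X ++ (c, r) :: Y)).getD S' false = (X.getLast hne).1 := by
        have hlast := getD_unpack_last X (WF_append_left hWF) hne
        rw [unpack_append]
        rw [List.getD_append _ _ _ _ (by omega)]
        rw [hS'] at hlast
        simpa using hlast
      have hneq : (X.getLast hne).1 ≠ c := by
        have h2 := hWF.2
        have := (List.isChain_append.mp h2).2.2
        exact this (X.getLast hne) (List.getLast?_eq_some_getLast (h := hne)) (c, r) (by simp)
      unfold Q
      rw [hval, hprev]
      rw [if_neg (by simpa using Ne.symm hneq)]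
  | succ d ihd =>
    have hQd := ihd (by omega)
    have hv1 : (unpack (X ++ (c, r) :: Y)).getD ((unpack X).length + d) false = c :=
      getD_unpack_run X Y c r d (by omega)
    have hv2 : (unpack (X ++ (c, r) :: Y)).getD ((unpack X).length + (d + 1)) false = c :=
      getD_unpack_run X Y c r (d + 1) hd
    rw [show (unpack X).length + (d + 1) = ((unpack X).length + d) + 1 by omega]
    unfold Q
    rw [show ((unpack X).length + d) + 1 = (unpack X).length + (d + 1) by omega, hv2, hv1]
    rw [if_pos (by simp)]
    rw [hQd]
    push_cast
    ring
  

-- ---- the tmp folds ----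

lemma fold1_eq (L : List Bool) (s : Nat) (ss : Int) (hss : ss = (s : Int))
    (hs : s ≤ L.length) :
    (PySem.List.pyRange 0 ss 1).foldl
      (fun t j => if L.getD j.toNat false then t + (2 : Int) ^ j.toNat else t) 0
    = (encodeN (L.take s) : Int) := by
  subst hss
  induction s with
  | zero => simp [PySem.List.pyRange_one_eq_nil, encodeN]
  | succ s ih =>
    rw [show ((s + 1 : Nat) : Int) = (s : Int) + 1 by push_cast; ring]
    rw [PySem.List.pyRange_one_succ_right (by omega), List.foldl_append]
    rw [ih (by omega)]
    simp only [List.foldl_cons, List.foldl_nil]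
    rw [show ((s : Int)).toNat = s by omega]
    rw [List.take_add_one]
    have hget : L[s]? = some (L[s]'(by omega)) := List.getElem?_eq_getElem (by omega)
    rw [hget]
    rw [encodeN_append]
    have hgd : L.getD s false = L[s]'(by omega) := List.getD_eq_getElem _ _ (by omega)
    rw [hgd]
    have hlen : (L.take s).length = s := by simp; omega
    cases hb : L[s]'(by omega)
    · simp [encodeN, hlen]
    · simp [encodeN, hlen]
      try push_cast
      try ring
  

lemma fold2_eq (L : List Bool) (S r : Nat) (m : Nat) (es ss : Int)
    (hes : es = (S : Int) + r - 1) (hss : ss = (S : Int)) :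
    ∀ (nn t0 : Int), nn = (S : Int) + r + m → S + r + m ≤ L.length →
    (PySem.List.pyRange (es + 1) nn 1).foldl
      (fun t j => if L.getD j.toNat false then
          t + (2 : Int) ^ (j - es + ss - 1).toNat else t) t0
    = t0 + (2 : Int) ^ S * (encodeN ((L.drop (S + r)).take m) : Int) := by
  induction m with
  | zero =>
    intro nn t0 hnn hm
    rw [PySem.List.pyRange_one_eq_nil (by omega)]
    simp [encodeN]
  | succ m ih =>
    intro nn t0 hnn hm
    rw [show nn = ((S : Int) + r + m) + 1 by omega]
    rw [PySem.List.pyRange_one_succ_right (by omega), List.foldl_append]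
    rw [ih _ _ rfl (by omega)]
    simp only [List.foldl_cons, List.foldl_nil]
    have hidx : ((S : Int) + r + m).toNat = S + r + m := by omega
    have hexp : ((S : Int) + r + m - es + ss - 1).toNat = S + m := by omega
    rw [hidx, hexp]
    have hlt : S + r + m < L.length := by omega
    have hgd : L.getD (S + r + m) false = L[S + r + m]'(by omega) :=
      List.getD_eq_getElem _ _ (by omega)
    have htake : (L.drop (S + r)).take (m + 1)
        = (L.drop (S + r)).take m ++ [L[S + r + m]'(by omega)] := by
      rw [List.take_add_one]
      have : (L.drop (S + r))[m]? = some (L[S + r + m]'(by omega)) := by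
        rw [List.getElem?_drop]
        exact List.getElem?_eq_getElem (by omega)
      rw [this]
      rfl
    rw [hgd, htake, encodeN_append]
    have hlen : ((L.drop (S + r)).take m).length = m := by
      simp
      omega
    rw [hlen]
    cases hb : L[S + r + m]'(by omega)
    · simp [encodeN]
    · simp [encodeN]
      push_cast
      ring
  

-- ---- B-side helpers ----

lemma removeRun_length_lt (rs : List Int) (j : Nat) (hj : j < rs.length) :
    (removeRun rs j).length < rs.length := by
  unfold removeRun
  by_cases h0 : j = 0
  · simp [h0]
    omega
  · rw [if_neg (by simpa using h0)]
    by_cases hl : j = rs.length - 1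
    · rw [if_pos (by simpa using hl)]
      simp
      omega
    · rw [if_neg (by simpa using hl)]
      simp
      omega
  

lemma solveGo_congr : ∀ (k : Nat) (rs : List Int) (f1 f2 : Nat),
    rs.length ≤ k → rs.length < f1 → rs.length < f2 → solveGo f1 rs = solveGo f2 rs := by
  intro k
  induction k with
  | zero =>
    intro rs f1 f2 hk h1 h2
    have : rs = [] := by
      cases rs with
      | nil => rfl
      | cons a t => simp at hk
    subst this
    obtain ⟨a, rfl⟩ : ∃ a, f1 = a + 1 := ⟨f1 - 1, by omega⟩
    obtain ⟨b, rfl⟩ : ∃ b, f2 = b + 1 := ⟨f2 - 1, by omega⟩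
    rfl
  | succ k ih =>
    intro rs f1 f2 hk h1 h2
    obtain ⟨a, rfl⟩ : ∃ a, f1 = a + 1 := ⟨f1 - 1, by omega⟩
    obtain ⟨b, rfl⟩ : ∃ b, f2 = b + 1 := ⟨f2 - 1, by omega⟩
    show (if rs.isEmpty then true
      else (List.range rs.length).any
        (fun j => if 2 ≤ rs.getD j 0 then solveGo a (removeRun rs j) else false))
      = (if rs.isEmpty then true
      else (List.range rs.length).any
        (fun j => if 2 ≤ rs.getD j 0 then solveGo b (removeRun rs j) else false))
    by_cases he : rs.isEmpty
    · simp [he]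
    · rw [if_neg he, if_neg he]
      apply PySem.List.any_congr_mem
      intro j hj
      have hjlt : j < rs.length := List.mem_range.mp hj
      have hrem := removeRun_length_lt rs j hjlt
      by_cases hge : 2 ≤ rs.getD j 0
      · rw [if_pos hge, if_pos hge]
        exact ih (removeRun rs j) a b (by omega) (by omega) (by omega)
      · rw [if_neg hge, if_neg hge]
  

lemma any_range_eq_decide (k : Nat) (g : Nat → Bool) :
    (List.range k).any g = decide (∃ j, j < k ∧ g j = true) := by
  by_cases h : ∃ j, j < k ∧ g j = true
  · rw [decide_eq_true h]
    obtain ⟨j, hj, hg⟩ := h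
    exact List.any_eq_true.mpr ⟨j, List.mem_range.mpr hj, hg⟩
  · rw [decide_eq_false h]
    rw [List.any_eq_false]
    intro x hx
    by_contra hgx
    exact h ⟨x, List.mem_range.mp hx, by simpa using hgx⟩
  

lemma runsI_getD (G : List (Bool × Nat)) (t : Nat) (ht : t < G.length) :
    (runsI G).getD t 0 = ((G.getD t (false, 0)).2 : Int) := by
  unfold runsI
  rw [List.getD_eq_getElem _ _ (by simpa using ht), List.getElem_map]
  rw [List.getD_eq_getElem _ _ ht]
  

lemma WF_cons_tail {p : Bool × Nat} {G : List (Bool × Nat)} (h : WF (p :: G)) : WF G :=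
  WF_append_right (X := [p]) (by simpa using h)

lemma merge_runs (G : List (Bool × Nat)) (hWF : WF G) (t : Nat) (ht : t < G.length) :
    runsI (groups (delL G t)) = removeRun (runsI G) t := by
  have hGlen : (runsI G).length = G.length := by simp [runsI]
  by_cases h0 : t = 0
  · -- first run deleted: no merge
    subst h0
    have hD : WF (G.drop 1) := by
      have : WF (G.take 1 ++ G.drop 1) := by rw [List.take_append_drop]; exact hWF
      exact WF_append_right this
    unfold delL
    simp only [List.take_zero, unpack_nil, List.nil_append, Nat.zero_add]
    rw [groups_unpack hD]
    unfold removeRun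
    rw [if_pos (by simp)]
    simp [runsI, List.map_drop]
  · by_cases hlast : t = G.length - 1
    · -- last run deleted: no merge
      have hD : G.drop (t + 1) = [] := by
        apply List.drop_eq_nil_of_le
        omega
      have hT : WF (G.take t) := by
        have : WF (G.take t ++ G.drop t) := by rw [List.take_append_drop]; exact hWF
        exact WF_append_left this
      unfold delL
      rw [hD]
      simp only [unpack_nil, List.append_nil]
      rw [groups_unpack hT]
      unfold removeRun
      rw [if_neg (by simpa using h0), if_pos (by rw [hGlen]; simpa using hlast)]
      simp [runsI, List.map_take]
    · -- interior run deleted: neighbours merge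
      have hT0 : 0 < t := by omega
      have htl : t + 1 < G.length := by omega
      set T := G.take t with hTdef
      set D := G.drop (t + 1) with hDdef
      have hTlen : T.length = t := by
        rw [hTdef, List.length_take]
        omega
      have hTne : T ≠ [] := by
        intro h
        rw [h] at hTlen
        have h00 : (0 : Nat) = t := hTlen
        omega
      have hDne : D ≠ [] := by
        intro h
        have hDl : (G.drop (t + 1)).length = 0 := by rw [← hDdef, h]; rfl
        rw [List.length_drop] at hDl
        omega
      set a := T.getLast hTne with hadef
      set b := D.head hDne with hbdef
      set T' := T.dropLast with hT'def
      set D' := D.tail with hD'def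
      have hTsplit : T = T' ++ [a] := (List.dropLast_append_getLast hTne).symm
      have hDsplit : D = b :: D' := (List.cons_head_tail hDne).symm
      have hGsplit : G = T ++ G[t] :: D := by
        conv_lhs => rw [show G = G.take t ++ G.drop t by simp]
        rw [List.drop_eq_getElem_cons ht]
      -- chain facts
      have hchain : List.IsChain (fun p q => p.1 ≠ q.1) (T ++ G[t] :: D) := by
        rw [← hGsplit]; exact hWF.2
      have hap : a.1 ≠ (G[t]'ht).1 := by
        have := (List.isChain_append.mp hchain).2.2
        exact this a (List.getLast?_eq_some_getLast (h := hTne)) (G[t]'ht) (by simp)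
      have hpb : (G[t]'ht).1 ≠ b.1 := by
        have h2 := (List.isChain_append.mp hchain).2.1
        have := (List.isChain_cons.mp h2).1
        apply this
        rw [hDsplit]
        rfl
      have hab : a.1 = b.1 := by
        have h1 : a.1 = !(G[t]'ht).1 := Bool.eq_not_of_ne hap
        have h2 : b.1 = !(G[t]'ht).1 := Bool.eq_not_of_ne (Ne.symm hpb)
        rw [h1, h2]
      -- memberships for counts
      have haG : a ∈ G := by
        rw [hGsplit]
        exact List.mem_append_left _ (by rw [hTsplit]; simp)
      have hbG : b ∈ G := by
        rw [hGsplit]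
        refine List.mem_append_right _ ?_
        rw [hDsplit]
        simp
      have ha2 : 1 ≤ a.2 := hWF.1 a haG
      have hb2 : 1 ≤ b.2 := hWF.1 b hbG
      -- the deleted list is the unpack of the merged groups
      have hdel : delL G t = unpack (T' ++ (a.1, a.2 + b.2) :: D') := by
        unfold delL
        rw [← hTdef, ← hDdef, hTsplit, hDsplit]
        rw [unpack_append, unpack_cons' a, unpack_cons' b]
        rw [unpack_append, unpack_cons']
        simp only [unpack_nil, List.append_nil]
        rw [← hab, List.replicate_add]
        simp only [List.append_assoc]
      -- the merged groups are well-formed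
      have hWFT : WF T := by
        have : WF (T ++ G[t] :: D) := by rw [← hGsplit]; exact hWF
        exact WF_append_left this
      have hWFD : WF D := by
        have : WF (T ++ G[t] :: D) := by rw [← hGsplit]; exact hWF
        exact WF_cons_tail (WF_append_right this)
      have hWFmerged : WF (T' ++ (a.1, a.2 + b.2) :: D') := by
        constructor
        · intro p hp
          rcases List.mem_append.mp hp with hp | hp
          · exact hWFT.1 p (by rw [hTsplit]; exact List.mem_append_left _ hp)
          · rcases List.mem_cons.mp hp with rfl | hp
            · simp; omega
            · exact hWFD.1 p (by rw [hDsplit]; exact List.mem_cons_of_mem _ hp)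
        · rw [List.isChain_append]
          refine ⟨?_, ?_, ?_⟩
          · have := hWFT.2
            rw [hTsplit] at this
            exact (List.isChain_append.mp this).1
          · rw [List.isChain_cons]
            constructor
            · intro y hy
              have h2 := hWFD.2
              rw [hDsplit] at h2
              have := (List.isChain_cons.mp h2).1 y
              rw [hab]
              exact this hy
            · have h2 := hWFD.2
              rw [hDsplit] at h2
              exact (List.isChain_cons.mp h2).2
          · intro x hx y hy
            have h2 := hWFT.2
            rw [hTsplit] at h2
            have := (List.isChain_append.mp h2).2.2 x hx a (by simp)
            simp only [List.head?_cons, Option.mem_def, Option.some.injEq] at hy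
            rw [← hy]
            exact this
      rw [hdel, groups_unpack hWFmerged]
      -- now compute the removeRun side
      unfold removeRun
      rw [if_neg (by simpa using h0), if_neg (by rw [hGlen]; simpa using hlast)]
      have hT' : T' = G.take (t - 1) := by
        rw [hT'def, List.dropLast_eq_take, hTlen, hTdef, List.take_take]
        congr 1
        omega
      have hD' : D' = G.drop (t + 2) := by
        rw [hD'def, hDdef, List.tail_drop]
      have haidx : G[t - 1]? = some a := by
        have h1 : T.getLast? = some a := by
          rw [hadef]
          exact List.getLast?_eq_some_getLast (h := hTne)
        rw [List.getLast?_eq_getElem?, hTlen, hTdef] at h1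
        rwa [List.getElem?_take_of_lt (by omega)] at h1
      have hbidx : G[t + 1]? = some b := by
        have h1 : D.head? = some b := by
          rw [hbdef]
          exact List.head?_eq_head hDne
        rw [List.head?_eq_getElem?, hDdef, List.getElem?_drop] at h1
        simpa using h1
      have e1 : (runsI G).take (t - 1) = runsI T' := by
        rw [hT']
        unfold runsI
        exact List.map_take.symm
      have e2 : (runsI G).drop (t + 2) = runsI D' := by
        rw [hD']
        unfold runsI
        exact List.map_drop.symm
      have e3 : (runsI G).getD (t - 1) 0 = (a.2 : Int) := by
        rw [runsI_getD G (t - 1) (by omega)]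
        congr 1
        rw [List.getD_eq_getElem?_getD, haidx]
        rfl
      have e4 : (runsI G).getD (t + 1) 0 = (b.2 : Int) := by
        rw [runsI_getD G (t + 1) (by omega)]
        congr 1
        rw [List.getD_eq_getElem?_getD, hbidx]
        rfl
      rw [e1, e2, e3, e4]
      unfold runsI
      simp only [List.map_append, List.map_cons]
      push_cast
      simp
  

lemma delL_length (G : List (Bool × Nat)) (hWF : WF G) (t : Nat) (ht : t < G.length) :
    (delL G t).length = (unpack G).length - (G.getD t (false, 0)).2 := by
  have hpd : G.getD t (false, 0) = G[t]'ht := List.getD_eq_getElem _ _ ht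
  rw [unpack_split G t ht, hpd]
  unfold delL
  simp
  omega

-- ---- the loop lemma ----

lemma exists_lt_succ_iff (k : Nat) (φ : Nat → Prop) :
    (∃ t, t < k + 1 ∧ φ t) ↔ (φ k ∨ ∃ t, t < k ∧ φ t) := by
  constructor
  · rintro ⟨t, ht, hφ⟩
    by_cases h : t = k
    · subst h; exact Or.inl hφ
    · exact Or.inr ⟨t, by omega, hφ⟩
  · rintro (h | ⟨t, ht, hφ⟩)
    · exact ⟨k, by omega, h⟩
    · exact ⟨t, by omega, hφ⟩
  

lemma loopA_neg (frec : Int → Int → Bool) (A : List Bool) (P : List Int) (length : Int)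
    (ret : Bool) (i : Int) (h : ¬ 0 < i) : loopA frec A P length ret i = ret := by
  rw [loopA, dif_neg h]

lemma loopA_one (frec : Int → Int → Bool) (A : List Bool) (P : List Int) (length : Int)
    (ret : Bool) (i : Int) (h : 0 < i) (h2 : ¬ 1 < P.getD i.toNat 0) :
    loopA frec A P length ret i = loopA frec A P length ret (i - 1) := by
  rw [loopA, dif_pos h, dif_neg h2]

lemma loopA_big (frec : Int → Int → Bool) (A : List Bool) (P : List Int) (length : Int)
    (i : Int) (h : 0 < i) (h2 : 1 < P.getD i.toNat 0) :
    loopA frec A P length false i =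
      (if frec
          ((PySem.List.pyRange (i + 1) length 1).foldl
            (fun t j => if A.getD j.toNat false then
                t + (2 : Int) ^ (j - i + (i - P.getD i.toNat 0 + 1) - 1).toNat else t)
            ((PySem.List.pyRange 0 (i - P.getD i.toNat 0 + 1) 1).foldl
              (fun t j => if A.getD j.toNat false then t + (2 : Int) ^ j.toNat else t) 0))
          (length - i + (i - P.getD i.toNat 0 + 1) - 1)
       then true
       else loopA frec A P length false (i - P.getD i.toNat 0)) := by
  rw [loopA, dif_pos h, dif_pos h2]
  cases hfr : frec
      ((PySem.List.pyRange (i + 1) length 1).foldl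
        (fun t j => if A.getD j.toNat false then
            t + (2 : Int) ^ (j - i + (i - P.getD i.toNat 0 + 1) - 1).toNat else t)
        ((PySem.List.pyRange 0 (i - P.getD i.toNat 0 + 1) 1).foldl
          (fun t j => if A.getD j.toNat false then t + (2 : Int) ^ j.toNat else t) 0))
      (length - i + (i - P.getD i.toNat 0 + 1) - 1) <;>
    simp only [hfr] <;> rfl

lemma take_unpack_left (X' Y : List (Bool × Nat)) (c : Bool) (r : Nat) :
    (unpack (X' ++ (c, r) :: Y)).take (unpack X').length = unpack X' := by
  rw [unpack_append]
  exact List.take_left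

lemma drop_unpack_left (X' Y : List (Bool × Nat)) (c : Bool) (r : Nat) :
    (unpack (X' ++ (c, r) :: Y)).drop ((unpack X').length + r) = unpack Y := by
  rw [unpack_append, unpack_cons, ← List.append_assoc]
  apply List.drop_left'
  simp

lemma delL_at (X' Y : List (Bool × Nat)) (c : Bool) (r : Nat) :
    delL (X' ++ (c, r) :: Y) X'.length = unpack X' ++ unpack Y := by
  unfold delL
  rw [List.take_left]
  congr 1
  rw [show X' ++ (c, r) :: Y = (X' ++ [(c, r)]) ++ Y by simp]
  apply congrArg
  apply List.drop_left'
  simp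

lemma getD_at_append (X' Y : List (Bool × Nat)) (c : Bool) (r : Nat) :
    (X' ++ (c, r) :: Y).getD X'.length (false, 0) = (c, r) := by
  rw [List.getD_append_right _ _ _ _ (by omega)]
  simp

lemma loopA_runs (frec : Int → Int → Bool) (G : List (Bool × Nat)) (hWF : WF G) :
    ∀ X Y : List (Bool × Nat), G = X ++ Y →
    loopA frec (unpack G) (buildP (unpack G) ((unpack G).length : Int))
        ((unpack G).length : Int) false (((unpack X).length : Int) - 1)
    = decide (∃ t, t < X.length ∧ 2 ≤ (G.getD t (false, 0)).2 ∧
        frec (encodeN (delL G t) : Int)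
          (((unpack G).length : Int) - ((G.getD t (false, 0)).2 : Int)) = true) := by
  intro X
  induction X using List.reverseRecOn with
  | nil =>
    intro Y hG
    rw [loopA_neg _ _ _ _ _ _ (by simp [unpack])]
    symm
    simp
  | append_singleton X' p ihX =>
    intro Y hG
    obtain ⟨c, r⟩ := p
    have hG' : G = X' ++ ((c, r) :: Y) := by simpa using hG
    have hr1 : 1 ≤ r := hWF.1 (c, r) (by rw [hG']; simp)
    set L := unpack G with hL
    set S := (unpack X').length with hS
    have hXlen : (unpack (X' ++ [(c, r)])).length = S + r := by
      rw [unpack_append, unpack_cons]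
      simp only [unpack_nil, List.append_nil, List.length_append, List.length_replicate]
      omega
    have hLsplit : L = unpack X' ++ List.replicate r c ++ unpack Y := by
      rw [hL, hG', unpack_append, unpack_cons, List.append_assoc]
    have hn : L.length = S + r + (unpack Y).length := by
      rw [hLsplit]
      simp only [List.length_append, List.length_replicate]
      omega
    have hXlen' : (X' ++ [(c, r)]).length = X'.length + 1 := by simp
    -- the getD at the top index is (c, r)
    have hgdt : G.getD X'.length (false, 0) = (c, r) := by
      rw [hG']
      exact getD_at_append X' Y c r
    have hIH := ihX ((c, r) :: Y) hG'
    rw [hXlen, hXlen']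
    by_cases hsmall : S + r ≤ 1
    · -- the run ends at index 0: the loop does not examine it
      have hS0 : S = 0 := by omega
      have hr1' : r = 1 := by omega
      rw [loopA_neg _ _ _ _ _ _ (by omega)]
      symm
      rw [decide_eq_false_iff_not]
      rintro ⟨t, ht, h2, _⟩
      have hX'nil : X' = [] := by
        apply unpack_eq_nil (WF_append_left (hG' ▸ hWF))
        have : (unpack X').length = 0 := hS0
        exact List.length_eq_zero_iff.mp this
      have : t = 0 := by
        rw [hX'nil] at ht
        simpa using ht
      subst this
      rw [hX'nil] at hgdt
      simp at hgdt
      rw [show G.getD 0 (false, 0) = (c, r) from by rw [hG', hX'nil]; simp] at h2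
      omega
    · -- the loop examines the run ending at index S + r - 1
      have hipos : (0 : Int) < (S + r : Nat) - 1 := by omega
      have hitn : (((S + r : Nat) : Int) - 1).toNat = S + r - 1 := by omega
      -- P at the end of the run equals r
      have hP : (buildP L (L.length : Int)).getD (S + r - 1) 0 = (r : Int) := by
        rw [buildP_getD L (S + r - 1) (by omega)]
        have hq := Q_run X' Y c r (by rw [← hG']; exact hWF) (r - 1) (by omega)
        rw [← hG', ← hL, ← hS] at hq
        rw [show S + r - 1 = S + (r - 1) by omega, hq]
        omega
      by_cases hr2 : 2 ≤ r
      · -- removable run: one recursive probe, then continue left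
        rw [loopA_big _ _ _ _ _ hipos (by rw [hitn, hP]; exact_mod_cast by omega)]
        rw [hitn, hP]
        -- clean up the integer index arithmetic
        have e1 : ((S + r : Nat) : Int) - 1 - (r : Int) + 1 = (S : Int) := by push_cast; ring
        have e2 : ((S + r : Nat) : Int) - 1 + 1 = (S : Int) + (r : Int) := by push_cast; ring
        rw [e1]
        -- the second fold appends the suffix, shifted
        rw [fold2_eq L S r (unpack Y).length (((S + r : Nat) : Int) - 1) (S : Int)
              (by push_cast; ring) rfl ((L.length : Int)) _ (by push_cast [hn]; ring) (by omega)]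
        -- the first fold is the encoding of the prefix
        rw [fold1_eq L S (S : Int) rfl (by omega)]
        rw [show (L.drop (S + r)).take (unpack Y).length = L.drop (S + r) from
              List.take_of_length_le (by rw [List.length_drop]; omega)]
        -- identify the probe argument with the deleted list
        have hdel : delL G X'.length = L.take S ++ L.drop (S + r) := by
          rw [hG', delL_at]
          congr 1
          · rw [hL, hG']
            exact (take_unpack_left X' Y c r).symm
          · rw [hL, hG']
            exact (drop_unpack_left X' Y c r).symm
        have htmp : (encodeN (L.take S) : Int)
            + (2 : Int) ^ S * (encodeN (L.drop (S + r)) : Int)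
            = (encodeN (delL G X'.length) : Int) := by
          rw [hdel, encodeN_append]
          have : (L.take S).length = S := by
            rw [List.length_take]
            omega
          rw [this]
          push_cast
          ring
        rw [htmp]
        have e3 : (L.length : Int) - (((S + r : Nat) : Int) - 1) + ((S : Int)) - 1
            = (L.length : Int) - (r : Int) := by push_cast; ring
        rw [show (L.length : Int) - (((S + r : Nat) : Int) - 1) + ((S : Int)) - 1
            = (L.length : Int) - (r : Int) from e3]
        have e4 : ((S + r : Nat) : Int) - 1 - (r : Int) = ((S : Int)) - 1 := by push_cast; ring
        rw [e4]
        rw [show ((S : Int)) - 1 = ((unpack X').length : Int) - 1 from by rw [← hS]]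
        rw [hIH]
        -- now both sides are a disjunction over t = X'.length and t < X'.length
        have hsplit : decide (∃ t, t < X'.length + 1 ∧ 2 ≤ (G.getD t (false, 0)).2 ∧
              frec (encodeN (delL G t) : Int)
                ((L.length : Int) - ((G.getD t (false, 0)).2 : Int)) = true)
            = decide ((2 ≤ (G.getD X'.length (false, 0)).2 ∧
              frec (encodeN (delL G X'.length) : Int)
                ((L.length : Int) - ((G.getD X'.length (false, 0)).2 : Int)) = true)
              ∨ (∃ t, t < X'.length ∧ 2 ≤ (G.getD t (false, 0)).2 ∧
              frec (encodeN (delL G t) : Int)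
                ((L.length : Int) - ((G.getD t (false, 0)).2 : Int)) = true)) :=
          decide_eq_decide.mpr (exists_lt_succ_iff X'.length _)
        rw [hsplit, Bool.decide_or]
        simp only [hgdt]
        cases hfr : frec (encodeN (delL G X'.length) : Int) ((L.length : Int) - (r : Int)) <;>
          simp [hfr, hr2]
      · -- run of length 1: skip to the previous run
        have hr1'' : r = 1 := by omega
        rw [loopA_one _ _ _ _ _ _ hipos (by rw [hitn, hP, hr1'']; omega)]
        have e5 : ((S + r : Nat) : Int) - 1 - 1 = ((unpack X').length : Int) - 1 := by
          rw [← hS]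
          push_cast [hr1'']
          ring
        rw [e5, hIH]
        have hsplit : decide (∃ t, t < X'.length + 1 ∧ 2 ≤ (G.getD t (false, 0)).2 ∧
              frec (encodeN (delL G t) : Int)
                ((L.length : Int) - ((G.getD t (false, 0)).2 : Int)) = true)
            = decide ((2 ≤ (G.getD X'.length (false, 0)).2 ∧
              frec (encodeN (delL G X'.length) : Int)
                ((L.length : Int) - ((G.getD X'.length (false, 0)).2 : Int)) = true)
              ∨ (∃ t, t < X'.length ∧ 2 ≤ (G.getD t (false, 0)).2 ∧
              frec (encodeN (delL G t) : Int)
                ((L.length : Int) - ((G.getD t (false, 0)).2 : Int)) = true)) :=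
          decide_eq_decide.mpr (exists_lt_succ_iff X'.length _)
        rw [hsplit, Bool.decide_or]
        simp only [hgdt]
        simp [hr1'']
  

-- ---- main equivalence on A's side ----

lemma runsI_length (G : List (Bool × Nat)) : (runsI G).length = G.length := by
  simp [runsI]

lemma Solve_step (rs : List Int) (hne : rs ≠ []) :
    Solve rs = (List.range rs.length).any
      (fun j => if 2 ≤ rs.getD j 0 then Solve (removeRun rs j) else false) := by
  unfold Solve
  show (if rs.isEmpty then true else _) = _
  rw [if_neg (by simpa using hne)]
  apply PySem.List.any_congr_mem
  intro j hj
  have hjlt : j < rs.length := List.mem_range.mp hj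
  by_cases hge : 2 ≤ rs.getD j 0
  · rw [if_pos hge, if_pos hge]
    exact solveGo_congr rs.length (removeRun rs j) rs.length ((removeRun rs j).length + 1)
      (by have := removeRun_length_lt rs j hjlt; omega)
      (removeRun_length_lt rs j hjlt) (by omega)
  · rw [if_neg hge, if_neg hge]

lemma bits_delL (G : List (Bool × Nat)) (hWF : WF G) (t : Nat) (ht : t < G.length) :
    bitsL (encodeN (delL G t) : Int) ((unpack G).length - (G.getD t (false, 0)).2)
      = delL G t := by
  rw [← delL_length G hWF t ht]
  exact bitsL_encodeN (delL G t)

lemma fGo_eq_Solve : ∀ (fuel : Nat) (bit : Int) (n : Nat), n < fuel →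
    fGo fuel bit (n : Int) = Solve (runsI (groups (bitsL bit n))) := by
  intro fuel
  induction fuel with
  | zero => intro bit n h; omega
  | succ fuel ih =>
    intro bit n hfuel
    match n with
    | 0 =>
      show (if ((0 : Nat) : Int) == 0 then true else _) = _
      rw [if_pos (by simp)]
      rfl
    | 1 =>
      show (if ((1 : Nat) : Int) == 0 then true
        else if ((1 : Nat) : Int) == 1 then false else _) = _
      rw [if_neg (by simp), if_pos (by simp)]
      show false = Solve (runsI (groups [pyBitTest bit 0]))
      show false = Solve (runsI (push (pyBitTest bit 0) []))
      rfl
    | (m + 2) =>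
      set n := m + 2 with hn
      have hn2 : 2 ≤ n := by omega
      set L := bitsL bit n with hLdef
      set G := groups L with hGdef
      have hWFG : WF G := WF_groups L
      have hUG : unpack G = L := unpack_groups L
      have hLlen : L.length = n := by simp [hLdef, bitsL]
      show (if ((n : Nat) : Int) == 0 then true
        else if ((n : Nat) : Int) == 1 then false else _) = _
      rw [if_neg (by simp), if_neg (by simp; omega)]
      rw [Alist_eq bit n]
      rw [← hLdef]
      -- align the arguments with the loop lemma
      have harg1 : buildP L ((n : Nat) : Int) = buildP (unpack G) (((unpack G).length : Nat) : Int) := by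
        rw [hUG, hLlen]
      have harg2 : ((n : Nat) : Int) - 1 = (((unpack (G)).length : Nat) : Int) - 1 := by
        rw [hUG, hLlen]
      have harg0 : L = unpack G := hUG.symm
      rw [show loopA (fGo fuel) L (buildP L ((n : Nat) : Int)) ((n : Nat) : Int) false
            (((n : Nat) : Int) - 1)
          = loopA (fGo fuel) (unpack G) (buildP (unpack G) (((unpack G).length : Nat) : Int))
            (((unpack G).length : Nat) : Int) false ((((unpack G).length : Nat) : Int) - 1)
          from by rw [hUG, hLlen]]
      rw [loopA_runs (fGo fuel) G hWFG G [] (by simp)]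
      -- rewrite each probe through the induction hypothesis
      have hprobe : ∀ t, t < G.length → 2 ≤ (G.getD t (false, 0)).2 →
          (fGo fuel (encodeN (delL G t) : Int)
            (((unpack G).length : Int) - ((G.getD t (false, 0)).2 : Int))
          = Solve (removeRun (runsI G) t)) := by
        intro t ht h2
        have hr_le : (G.getD t (false, 0)).2 ≤ n := by
          have hsp := unpack_split G t ht
          have : (G.getD t (false, 0)) = G[t]'ht := List.getD_eq_getElem _ _ ht
          rw [this]
          have hlen := congrArg List.length hsp
          simp at hlen
          omega
        have hcast : ((unpack G).length : Int) - ((G.getD t (false, 0)).2 : Int)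
            = (((unpack G).length - (G.getD t (false, 0)).2 : Nat) : Int) := by
          rw [hUG, hLlen]
          omega
        rw [hcast]
        rw [ih (encodeN (delL G t) : Int) ((unpack G).length - (G.getD t (false, 0)).2)
          (by rw [hUG, hLlen]; omega)]
        rw [bits_delL G hWFG t ht]
        rw [merge_runs G hWFG t ht]
      -- both sides are the same bounded existential
      rw [Solve_step (runsI G) (by
        intro hnil
        have := congrArg List.length hnil
        rw [runsI_length] at this
        have hGne : G ≠ [] := by
          intro hG0
          rw [hG0] at hUG
          have := congrArg List.length hUG
          simp [hLlen, unpack] at this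
        exact hGne (List.length_eq_zero_iff.mp this))]
      rw [any_range_eq_decide ((runsI G).length)
        (fun j => if 2 ≤ (runsI G).getD j 0 then Solve (removeRun (runsI G) j) else false)]
      rw [decide_eq_decide]
      rw [runsI_length]
      constructor
      · rintro ⟨t, ht, h2, hfr⟩
        refine ⟨t, ht, ?_⟩
        rw [if_pos (by rw [runsI_getD G t ht]; exact_mod_cast h2)]
        rw [← hprobe t ht h2]
        exact hfr
      · rintro ⟨t, ht, hfr⟩
        by_cases h2 : 2 ≤ (runsI G).getD t 0
        · rw [if_pos h2] at hfr
          have h2' : 2 ≤ (G.getD t (false, 0)).2 := by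
            rw [runsI_getD G t ht] at h2
            exact_mod_cast h2
          exact ⟨t, ht, h2', by rw [hprobe t ht h2']; exact hfr⟩
        · rw [if_neg h2] at hfr
          exact absurd hfr (by simp)
  

-- ---- B's side ----

lemma push_pushR (c b : Bool) (G : List (Bool × Nat)) :
    push c (pushR G b) = pushR (push c G) b := by
  match G with
  | [] =>
    by_cases hcb : c = b
    · simp [push, pushR, hcb]
    · simp [push, pushR, hcb, Ne.symm hcb]
  | [(d, k)] =>
    by_cases hcd : c = d <;> by_cases hbd : b = d <;>
      simp [push, pushR, hcd, hbd] <;> subst_vars <;> simp_all [push, pushR]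
  | x :: y :: t =>
    by_cases hcx : c = x.1
    · rw [show push c (x :: y :: t) = (x.1, x.2 + 1) :: y :: t by simp [push, hcx]]
      rw [show pushR (x :: y :: t) b = x :: pushR (y :: t) b from rfl]
      rw [show pushR ((x.1, x.2 + 1) :: y :: t) b = (x.1, x.2 + 1) :: pushR (y :: t) b from rfl]
      match hyt : pushR (y :: t) b with
      | [] => simp [push, hcx]
      | z :: t' => simp [push, hcx]
    · rw [show push c (x :: y :: t) = (c, 1) :: x :: y :: t by simp [push, hcx]]
      rw [show pushR (x :: y :: t) b = x :: pushR (y :: t) b from rfl]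
      rw [show pushR ((c, 1) :: x :: y :: t) b = (c, 1) :: pushR (x :: y :: t) b from rfl]
      rw [show pushR (x :: y :: t) b = x :: pushR (y :: t) b from rfl]
      match hyt : pushR (y :: t) b with
      | [] => simp [push, hcx]
      | z :: t' => simp [push, hcx]

lemma groups_concat (L : List Bool) (b : Bool) : groups (L ++ [b]) = pushR (groups L) b := by
  induction L with
  | nil => rfl
  | cons c l ih =>
    show push c (groups (l ++ [b])) = pushR (push c (groups l)) b
    rw [ih, push_pushR]
  

lemma groups_ne_nil {L : List Bool} (h : L ≠ []) : groups L ≠ [] := by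
  intro hg
  apply h
  rw [← unpack_groups L, hg]
  rfl

lemma getLast?_push_of_ne_nil (b : Bool) (G : List (Bool × Nat)) (h : G ≠ []) :
    (push b G).getLast?.map Prod.fst = G.getLast?.map Prod.fst := by
  match G with
  | (d, k) :: t =>
    by_cases hb : b = d
    · rw [show push b ((d, k) :: t) = (d, k + 1) :: t by simp [push, hb]]
      cases t with
      | nil => rfl
      | cons u t' => rw [List.getLast?_cons_cons, List.getLast?_cons_cons]
    · rw [show push b ((d, k) :: t) = (b, 1) :: (d, k) :: t by simp [push, hb]]
      rw [List.getLast?_cons_cons]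

lemma getLast?_fst_groups (L : List Bool) : (groups L).getLast?.map Prod.fst = L.getLast? := by
  induction L with
  | nil => rfl
  | cons b l ih =>
    cases hl : l with
    | nil => rfl
    | cons c l' =>
      show (push b (groups (c :: l'))).getLast?.map Prod.fst = (b :: c :: l').getLast?
      rw [getLast?_push_of_ne_nil b _ (groups_ne_nil (by simp)),
        List.getLast?_cons_cons]
      rw [hl] at ih
      exact ih
  

lemma pushR_eq_append (G : List (Bool × Nat)) (h : G ≠ []) (b : Bool) :
    pushR G b = if b == (G.getLast h).1
      then G.dropLast ++ [((G.getLast h).1, (G.getLast h).2 + 1)]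
      else G ++ [(b, 1)] := by
  match G with
  | [(d, k)] =>
    by_cases hb : b = d <;> simp [pushR, hb]
  | x :: y :: t =>
    have hyt : (y :: t) ≠ [] := by simp
    have hlast : (x :: y :: t).getLast h = (y :: t).getLast hyt := List.getLast_cons hyt
    rw [show pushR (x :: y :: t) b = x :: pushR (y :: t) b from rfl]
    rw [pushR_eq_append (y :: t) hyt b]
    rw [hlast]
    by_cases hb : b == ((y :: t).getLast hyt).1
    · rw [if_pos hb, if_pos hb]
      rfl
    · rw [if_neg hb, if_neg hb]
      rfl

lemma runsI_append (G H : List (Bool × Nat)) : runsI (G ++ H) = runsI G ++ runsI H := by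
  simp [runsI]

lemma boolint_inj (a b : Bool) (h : (if a then (1 : Int) else 0) = (if b then (1 : Int) else 0)) :
    a = b := by
  cases a <;> cases b <;> simp_all

lemma buildRuns_eq (bit : Int) (n : Nat) :
    (PySem.List.pyRange 0 (n : Int) 1).foldl
      (fun st i =>
        buildRunsStep st (PySem.Int.mod (PySem.Int.floordiv bit ((2 : Int) ^ i.toNat)) 2))
      ([], none)
    = (runsI (groups (bitsL bit n)),
       (bitsL bit n).getLast?.map (fun b => if b then (1 : Int) else 0)) := by
  induction n with
  | zero =>
    rw [PySem.List.pyRange_one_eq_nil (by omega)]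
    rfl
  | succ n ih =>
    rw [show ((n + 1 : Nat) : Int) = (n : Int) + 1 by push_cast; ring]
    rw [PySem.List.pyRange_one_succ_right (by omega), List.foldl_append]
    rw [ih]
    simp only [List.foldl_cons, List.foldl_nil]
    set L := bitsL bit n with hL
    have hsplit : bitsL bit (n + 1) = L ++ [pyBitTest bit (n : Int)] := by
      rw [hL]
      unfold bitsL
      rw [List.range_succ, List.map_append]
      rfl
    set β := pyBitTest bit (n : Int) with hβ
    set bv := PySem.Int.mod (PySem.Int.floordiv bit ((2 : Int) ^ ((n : Int)).toNat)) 2 with hbv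
    have hb01 : bv = if β then 1 else 0 := by
      have h0 : 0 ≤ bv := PySem.Int.mod_nonneg _ (by omega)
      have h2 : bv < 2 := PySem.Int.mod_lt _ (by omega)
      have hβbv : β = (bv == 1) := by
        rw [hβ, hbv]
        rfl
      rcases (by omega : bv = 0 ∨ bv = 1) with h | h
      · rw [h] at hβbv ⊢
        rw [hβbv]
        rfl
      · rw [h] at hβbv ⊢
        rw [hβbv]
        rfl
    rw [hsplit, groups_concat]
    unfold buildRunsStep
    cases hGL : groups L with
    | nil =>
      have hLnil : L = [] := by
        rw [← unpack_groups L, hGL]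
        rfl
      rw [hLnil]
      simp only [runsI, List.map_nil, List.getLast?_nil, Option.map_none]
      rw [if_neg (by simp)]
      rw [show pushR [] β = [(β, 1)] from rfl]
      simp only [runsI, List.map_cons, List.map_nil, List.nil_append]
      rw [hb01]
      rfl
    | cons g0 gt =>
      have hGne : groups L ≠ [] := by rw [hGL]; simp
      have hLne : L ≠ [] := by
        intro h
        rw [h] at hGL
        exact absurd hGL.symm (by simp [groups])
      set glast := (groups L).getLast hGne with hglast
      have hlastfst : L.getLast? = some glast.1 := by
        rw [← getLast?_fst_groups L, List.getLast?_eq_some_getLast (h := hGne)]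
        rfl
      have hLlast : L.getLast hLne = glast.1 := by
        have := hlastfst
        rw [List.getLast?_eq_some_getLast (h := hLne)] at this
        exact Option.some.inj this
      rw [← hGL]
      rw [pushR_eq_append (groups L) hGne β]
      rw [hlastfst]
      have hsnd : ((bitsL bit n ++ [β]).getLast?.map (fun b => if b then (1 : Int) else 0))
          = some (if β then (1 : Int) else 0) := by
        rw [List.getLast?_concat]
        rfl
      by_cases hmatch : β = glast.1
      · rw [if_pos (by
          rw [hb01, hmatch]
          simp only [Option.map_some]
          cases hg : glast.1 <;> simp)]
        rw [if_pos (by rw [← hglast]; simpa using hmatch)]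
        have hfst : (runsI (groups L)).dropLast ++ [(runsI (groups L)).getLastD 0 + 1]
            = runsI ((groups L).dropLast ++ [(glast.1, glast.2 + 1)]) := by
          rw [runsI_append]
          have h1 : runsI ((groups L).dropLast) = (runsI (groups L)).dropLast := by
            unfold runsI
            exact List.map_dropLast
          have h2 : (runsI (groups L)).getLastD 0 = (glast.2 : Int) := by
            rw [List.getLastD_eq_getLast?]
            unfold runsI
            rw [List.getLast?_map, List.getLast?_eq_some_getLast (h := hGne), ← hglast]
            rfl
          rw [h1, h2]
          rfl
        rw [Prod.mk.injEq]
        refine ⟨hfst, ?_⟩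
        show Option.map (fun b => if b = true then (1 : Int) else 0) (some glast.1)
            = Option.map (fun b => if b = true then (1 : Int) else 0) ((L ++ [β]).getLast?)
        rw [List.getLast?_concat, hmatch]
      · rw [if_neg (by
          simp only [Option.map_some, beq_iff_eq, Option.some.injEq]
          intro hc
          rw [hb01] at hc
          exact hmatch (boolint_inj β glast.1 hc))]
        rw [if_neg (by rw [← hglast]; simpa using hmatch)]
        rw [Prod.mk.injEq]
        refine ⟨?_, ?_⟩
        · show runsI (groups L) ++ [1] = runsI (groups L ++ [(β, 1)])
          rw [runsI_append]
          rfl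
        · show some bv
            = Option.map (fun b => if b = true then (1 : Int) else 0) ((L ++ [β]).getLast?)
          rw [List.getLast?_concat, hb01]
          rfl

lemma f_alt_eq_Solve (bit : Int) (n : Nat) :
    f_alt bit (n : Int) = Solve (runsI (groups (bitsL bit n))) := by
  show solveGo (((n : Int)).toNat + 1)
      ((PySem.List.pyRange 0 (n : Int) 1).foldl
        (fun st i =>
          buildRunsStep st (PySem.Int.mod (PySem.Int.floordiv bit ((2 : Int) ^ i.toNat)) 2))
        ([], none)).1 = _
  rw [buildRuns_eq bit n]
  show solveGo (((n : Int)).toNat + 1) (runsI (groups (bitsL bit n))) = _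
  have hlen : (runsI (groups (bitsL bit n))).length ≤ n := by
    rw [runsI_length]
    calc (groups (bitsL bit n)).length ≤ (unpack (groups (bitsL bit n))).length :=
          length_le_unpack (WF_groups _)
      _ = n := by rw [unpack_groups]; simp [bitsL]
  rw [show ((n : Int)).toNat = n by omega]
  exact solveGo_congr n _ _ _ hlen (by omega) (by omega)
  

-- ===== VERDICT (by name: the statement is the Claim_ definition above) =====
theorem f_spec : Claim_equal_f := by
  intro bit length hDom hPre
  unfold Pre_f at hPre
  unfold Spec_f
  obtain ⟨n, rfl⟩ : ∃ n : Nat, length = (n : Int) := ⟨length.toNat, by omega⟩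
  show fGo ((n : Int).toNat + 1) bit (n : Int) = _
  rw [show ((n : Int).toNat + 1) = n + 1 by simp]
  rw [fGo_eq_Solve (n + 1) bit n (by omega), f_alt_eq_Solve]
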